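-- pv_equiv track=rewrite | github.com/hwstar-1204/Solve_Algorithm | programmers/피로도.py | solution
-- ===== SOURCE A (Python) =====
-- from itertools import permutations
--
-- def solution(k, dungeons):
--     max_count = 0
--
--     all_courses = permutations(dungeons, len(dungeons))
--
--     for course in all_courses:
--         tmp_k = k # 60 20
--         tmp_cnt = 0 # 1 2
--         for c in course:
--             if c[0] <= tmp_k:
--                 tmp_k -= c[1]
--                 tmp_cnt += 1
--
--         max_count = max(max_count, tmp_cnt)
--
--     return max_count
-- ===== SOURCE B (Python) =====
-- def solution(k, dungeons):
--     # Recursive backtracking: try each affordable dungeon first, recurse on the rest.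
--     best = 0
--     for i, (req, cost) in enumerate(dungeons):
--         if req <= k:
--             best = max(best, 1 + solution(k - cost, dungeons[:i] + dungeons[i + 1:]))
--     return best
-- ===== Notes on version B (the rewrite author's own statement) =====
-- stated objective: alternative
-- what changed: A enumerates all n! permutations of the dungeons and greedily simulates each course; B is a recursive backtracking search that branches only on the affordable next dungeon.
import Mathlib
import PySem

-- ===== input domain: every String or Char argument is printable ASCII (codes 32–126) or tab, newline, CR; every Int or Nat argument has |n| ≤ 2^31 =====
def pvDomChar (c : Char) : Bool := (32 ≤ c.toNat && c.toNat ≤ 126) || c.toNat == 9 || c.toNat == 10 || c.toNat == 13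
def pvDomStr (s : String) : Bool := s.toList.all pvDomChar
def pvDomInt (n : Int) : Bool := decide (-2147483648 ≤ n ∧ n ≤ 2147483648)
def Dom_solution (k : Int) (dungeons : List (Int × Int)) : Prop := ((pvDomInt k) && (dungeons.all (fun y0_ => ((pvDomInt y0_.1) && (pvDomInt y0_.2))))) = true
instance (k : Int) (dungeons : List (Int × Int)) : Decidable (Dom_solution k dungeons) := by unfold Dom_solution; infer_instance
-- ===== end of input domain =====

-- B replaces A's brute force over all n! generated orderings by a recursive
-- backtracking search that branches only on the affordable next dungeon (objective: alternative).

-- ===== PORT A =====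
-- inner loop body of A: the (tmp_k, tmp_cnt) update for one dungeon c
def pvStepA (s : Int × Int) (c : Int × Int) : Int × Int :=
  if c.1 ≤ s.1 then (s.1 - c.2, s.2 + 1) else s

def solution (k : Int) (dungeons : List (Int × Int)) : Int :=
  (PySem.List.permutations dungeons dungeons.length).foldl
    (fun maxCount course => max maxCount (course.foldl pvStepA (k, 0)).2) 0

-- ===== PORT B =====
def solution_alt (k : Int) (dungeons : List (Int × Int)) : Int :=
  (List.finRange dungeons.length).foldl
    (fun best i =>
      if (dungeons.get i).1 ≤ k then
        max best (1 + solution_alt (k - (dungeons.get i).2) (dungeons.eraseIdx i))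
      else best) 0
termination_by dungeons.length
decreasing_by
  have hi := i.isLt
  rw [List.length_eraseIdx]
  simp [hi]
  omega

-- ===== PRECONDITION & SPEC =====
def Spec_solution (k : Int) (dungeons : List (Int × Int)) (out : Int) : Prop := out = solution_alt k dungeons
instance (k : Int) (dungeons : List (Int × Int)) (out : Int) : Decidable (Spec_solution k dungeons out) := by unfold Spec_solution; infer_instance

-- ===== CLAIM (what is proved, stated in full; the proofs are below) =====
def Claim_equal_solution : Prop := ∀ (k : Int) (dungeons : List (Int × Int)), Dom_solution k dungeons → Spec_solution k dungeons (solution k dungeons)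

-- ===== LEMMAS AND PROOFS =====

-- cleared-count of one fixed course under A's greedy inner loop
def pvG : Int → List (Int × Int) → Int
  | _, [] => 0
  | k, c :: rest => if c.1 ≤ k then 1 + pvG (k - c.2) rest else pvG k rest

theorem pvG_nonneg : ∀ (k : Int) (cs : List (Int × Int)), 0 ≤ pvG k cs := by
  intro k cs
  induction cs generalizing k with
  | nil => simp [pvG]
  | cons c t ih =>
    simp only [pvG]
    split_ifs with h
    · have := ih (k - c.2); omega
    · exact ih k

theorem pvFoldl_stepA_snd : ∀ (cs : List (Int × Int)) (k cnt : Int),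
    (cs.foldl pvStepA (k, cnt)).2 = cnt + pvG k cs := by
  intro cs
  induction cs with
  | nil => intro k cnt; simp [pvG]
  | cons c t ih =>
    intro k cnt
    simp only [List.foldl_cons, pvStepA, pvG]
    split_ifs with h
    · rw [ih]; ring
    · rw [ih]

-- fold shape of B: "best' = if cond i then max best (v i) else best"
theorem pvFold_le_iff {α : Type} (cond : α → Prop) [DecidablePred cond] (v : α → Int) :
    ∀ (L : List α) (a B : Int),
    (L.foldl (fun b x => if cond x then max b (v x) else b) a ≤ B) ↔
      (a ≤ B ∧ ∀ x ∈ L, cond x → v x ≤ B) := by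
  intro L
  induction L with
  | nil => intro a B; simp
  | cons x t ih =>
    intro a B
    simp only [List.foldl_cons]
    by_cases h : cond x
    · rw [if_pos h, ih, max_le_iff]
      constructor
      · rintro ⟨⟨ha, hv⟩, hall⟩
        refine ⟨ha, ?_⟩
        intro y hy hc
        rcases List.mem_cons.mp hy with rfl | hy
        · exact hv
        · exact hall y hy hc
      · rintro ⟨ha, hall⟩
        exact ⟨⟨ha, hall x (List.mem_cons_self) h⟩,
          fun y hy hc => hall y (List.mem_cons_of_mem _ hy) hc⟩
    · rw [if_neg h, ih]
      constructor
      · rintro ⟨ha, hall⟩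
        refine ⟨ha, ?_⟩
        intro y hy hc
        rcases List.mem_cons.mp hy with rfl | hy
        · exact absurd hc h
        · exact hall y hy hc
      · rintro ⟨ha, hall⟩
        exact ⟨ha, fun y hy hc => hall y (List.mem_cons_of_mem _ hy) hc⟩

theorem pvFold_attain {α : Type} (cond : α → Prop) [DecidablePred cond] (v : α → Int) :
    ∀ (L : List α) (a : Int),
    (L.foldl (fun b x => if cond x then max b (v x) else b) a = a) ∨
      ∃ x ∈ L, cond x ∧ L.foldl (fun b x => if cond x then max b (v x) else b) a = v x := by
  intro L
  induction L with
  | nil => intro a; left; rfl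
  | cons x t ih =>
    intro a
    simp only [List.foldl_cons]
    by_cases h : cond x
    · rw [if_pos h]
      rcases ih (max a (v x)) with h1 | ⟨y, hy, hc, hv⟩
      · rcases max_choice a (v x) with hm | hm
        · left; rw [h1, hm]
        · right; exact ⟨x, List.mem_cons_self, h, by rw [h1, hm]⟩
      · right; exact ⟨y, List.mem_cons_of_mem _ hy, hc, hv⟩
    · rw [if_neg h]
      rcases ih a with h1 | ⟨y, hy, hc, hv⟩
      · left; exact h1
      · right; exact ⟨y, List.mem_cons_of_mem _ hy, hc, hv⟩

-- the fold shape of A: plain running max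
theorem pvMaxfold_le_iff {α : Type} (f : α → Int) :
    ∀ (L : List α) (a B : Int),
    (L.foldl (fun m x => max m (f x)) a ≤ B) ↔ (a ≤ B ∧ ∀ x ∈ L, f x ≤ B) := by
  intro L
  induction L with
  | nil => intro a B; simp
  | cons x t ih =>
    intro a B
    simp only [List.foldl_cons]
    rw [ih, max_le_iff]
    constructor
    · rintro ⟨⟨ha, hv⟩, hall⟩
      refine ⟨ha, ?_⟩
      intro y hy
      rcases List.mem_cons.mp hy with rfl | hy
      · exact hv
      · exact hall y hy
    · rintro ⟨ha, hall⟩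
      exact ⟨⟨ha, hall x (List.mem_cons_self)⟩,
        fun y hy => hall y (List.mem_cons_of_mem _ hy)⟩

theorem pvMaxfold_elem_le {α : Type} (f : α → Int) (L : List α) (a : Int) {x : α}
    (hx : x ∈ L) : f x ≤ L.foldl (fun m x => max m (f x)) a :=
  ((pvMaxfold_le_iff f L a _).mp le_rfl).2 x hx

-- unfolding lemma for the well-founded recursion of solution_alt
theorem solution_alt_eq (k : Int) (ds : List (Int × Int)) :
    solution_alt k ds =
      (List.finRange ds.length).foldl
        (fun best i =>
          if (ds.get i).1 ≤ k then
            max best (1 + solution_alt (k - (ds.get i).2) (ds.eraseIdx i))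
          else best) 0 := by
  rw [solution_alt]

theorem salt_nonneg (k : Int) (ds : List (Int × Int)) : 0 ≤ solution_alt k ds := by
  rw [solution_alt_eq]
  exact ((pvFold_le_iff (fun i => (ds.get i).1 ≤ k)
    (fun i => 1 + solution_alt (k - (ds.get i).2) (ds.eraseIdx i))
    (List.finRange ds.length) 0 _).mp le_rfl).1

theorem salt_branch_le (k : Int) (ds : List (Int × Int)) (i : Fin ds.length)
    (h : (ds.get i).1 ≤ k) :
    1 + solution_alt (k - (ds.get i).2) (ds.eraseIdx i) ≤ solution_alt k ds := by
  conv_rhs => rw [solution_alt_eq]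
  exact ((pvFold_le_iff (fun i => (ds.get i).1 ≤ k)
    (fun i => 1 + solution_alt (k - (ds.get i).2) (ds.eraseIdx i))
    (List.finRange ds.length) 0 _).mp le_rfl).2 i (List.mem_finRange i) h

theorem salt_le_of (k : Int) (ds : List (Int × Int)) (B : Int) (h0 : 0 ≤ B)
    (h : ∀ i : Fin ds.length, (ds.get i).1 ≤ k →
      1 + solution_alt (k - (ds.get i).2) (ds.eraseIdx i) ≤ B) :
    solution_alt k ds ≤ B := by
  rw [solution_alt_eq]
  exact (pvFold_le_iff (fun i => (ds.get i).1 ≤ k)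
    (fun i => 1 + solution_alt (k - (ds.get i).2) (ds.eraseIdx i))
    (List.finRange ds.length) 0 B).mpr ⟨h0, fun i _ hc => h i hc⟩

theorem salt_attain (k : Int) (ds : List (Int × Int)) :
    solution_alt k ds = 0 ∨
      ∃ i : Fin ds.length, (ds.get i).1 ≤ k ∧
        solution_alt k ds = 1 + solution_alt (k - (ds.get i).2) (ds.eraseIdx i) := by
  rw [solution_alt_eq]
  rcases pvFold_attain (fun i => (ds.get i).1 ≤ k)
    (fun i => 1 + solution_alt (k - (ds.get i).2) (ds.eraseIdx i))
    (List.finRange ds.length) 0 with h | ⟨i, _, hc, hv⟩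
  · left; exact h
  · right; exact ⟨i, hc, hv⟩

-- monotonicity of B's value in the available multiset of dungeons
theorem salt_subperm_le : ∀ (n : Nat) (k : Int) (ds₁ ds₂ : List (Int × Int)),
    ds₂.length = n → ds₁.Subperm ds₂ → solution_alt k ds₁ ≤ solution_alt k ds₂ := by
  intro n
  induction n using Nat.strong_induction_on with
  | _ n ih =>
    intro k ds₁ ds₂ hn hsub
    apply salt_le_of _ _ _ (salt_nonneg _ _)
    intro i hi
    obtain ⟨j, hj⟩ := List.mem_iff_get.mp (hsub.subset (ds₁.get_mem i))
    have p1 : (ds₁.erase (ds₁.get i)).Perm (ds₁.eraseIdx i) := by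
      simpa using List.erase_getElem (l := ds₁) (i := i) i.isLt
    have p2 : (ds₂.erase (ds₁.get i)).Perm (ds₂.eraseIdx j) := by
      have hj' : ds₂[(j : Nat)] = ds₁.get i := by simpa using hj
      have h2 := List.erase_getElem (l := ds₂) (i := j) j.isLt
      rw [hj'] at h2
      simpa using h2
    have hsub' : (ds₁.eraseIdx i).Subperm (ds₂.eraseIdx j) :=
      (p2.subperm_left).mp ((p1.subperm_right).mp (hsub.erase (ds₁.get i)))
    have hlen : (ds₂.eraseIdx j).length < n := by
      have := j.isLt
      rw [List.length_eraseIdx]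
      simp [this]
      omega
    have hle := ih _ hlen (k - (ds₁.get i).2) _ _ rfl hsub'
    have hb := salt_branch_le k ds₂ j (by rw [hj]; exact hi)
    rw [hj] at hb
    omega

-- every course's greedy count is at most B's answer
theorem pvG_le_salt : ∀ (n : Nat) (k : Int) (ds course : List (Int × Int)),
    ds.length = n → course ∈ PySem.List.permutations ds ds.length →
    pvG k course ≤ solution_alt k ds := by
  intro n
  induction n using Nat.strong_induction_on with
  | _ n ih =>
    intro k ds course hn hc
    match n, hn with
    | 0, hn =>
      have : ds = [] := List.length_eq_zero_iff.mp hn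
      subst this
      simp only [List.length_nil, PySem.List.permutations_zero, List.mem_singleton] at hc
      subst hc
      simpa [pvG] using salt_nonneg k []
    | (m+1), hn =>
      rw [hn, PySem.List.permutations_succ] at hc
      simp only [List.mem_flatMap, List.mem_range] at hc
      obtain ⟨i, hi, hmem⟩ := hc
      rw [List.getElem?_eq_getElem hi] at hmem
      simp only [List.mem_map] at hmem
      obtain ⟨p, hp, rfl⟩ := hmem
      have hlen : (ds.eraseIdx i).length = m := by
        rw [List.length_eraseIdx]; simp [hi]; omega
      simp only [pvG]
      split_ifs with hq
      · have h1 := ih m (by omega) (k - ds[i].2) (ds.eraseIdx i) p hlen (by rw [hlen]; exact hp)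
        have h2 := salt_branch_le k ds ⟨i, hi⟩ hq
        simp only [List.get_eq_getElem] at h2
        omega
      · have h1 := ih m (by omega) k (ds.eraseIdx i) p hlen (by rw [hlen]; exact hp)
        have h2 := salt_subperm_le ds.length k (ds.eraseIdx i) ds rfl
          ((List.eraseIdx_sublist ds i).subperm)
        omega

theorem self_mem_permutations (ds : List (Int × Int)) :
    ds ∈ PySem.List.permutations ds ds.length := by
  induction ds with
  | nil => simp [PySem.List.permutations_zero]
  | cons x t ih =>
    rw [List.length_cons, PySem.List.permutations_succ]
    refine List.mem_flatMap.mpr ⟨0, List.mem_range.mpr (by simp), ?_⟩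
    simp only [List.getElem?_cons_zero, List.eraseIdx_cons_zero]
    exact List.mem_map.mpr ⟨t, ih, rfl⟩

-- some course attains B's answer
theorem exists_course : ∀ (n : Nat) (k : Int) (ds : List (Int × Int)), ds.length = n →
    ∃ course ∈ PySem.List.permutations ds ds.length, solution_alt k ds ≤ pvG k course := by
  intro n
  induction n using Nat.strong_induction_on with
  | _ n ih =>
    intro k ds hn
    rcases salt_attain k ds with h0 | ⟨i, hq, heq⟩
    · exact ⟨ds, self_mem_permutations ds, by rw [h0]; exact pvG_nonneg k ds⟩
    · have hpos : 0 < ds.length := i.pos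
      have hlen : (ds.eraseIdx i).length = ds.length - 1 := by
        rw [List.length_eraseIdx]; simp [i.isLt]
      obtain ⟨course', hc', hle'⟩ := ih (ds.length - 1) (by omega)
        (k - (ds.get i).2) (ds.eraseIdx i) hlen
      refine ⟨ds.get i :: course', ?_, ?_⟩
      · have hd : ds.length = (ds.length - 1) + 1 := by omega
        rw [hd, PySem.List.permutations_succ]
        refine List.mem_flatMap.mpr ⟨i.val, List.mem_range.mpr i.isLt, ?_⟩
        rw [List.getElem?_eq_getElem i.isLt]
        simp only [List.mem_map]
        exact ⟨course', by rw [← hlen]; simpa using hc', by simp⟩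
      · simp only [pvG, if_pos hq]
        omega

theorem solution_eq_alt (k : Int) (ds : List (Int × Int)) :
    solution k ds = solution_alt k ds := by
  unfold solution
  simp only [pvFoldl_stepA_snd, zero_add]
  apply le_antisymm
  · exact (pvMaxfold_le_iff (pvG k) _ 0 _).mpr
      ⟨salt_nonneg k ds, fun c hc => pvG_le_salt ds.length k ds c rfl hc⟩
  · obtain ⟨course, hc, hle⟩ := exists_course ds.length k ds rfl
    exact le_trans hle (pvMaxfold_elem_le (pvG k) _ 0 hc)

-- ===== VERDICT (by name: the statement is the Claim_ definition above) =====
theorem solution_spec : Claim_equal_solution := by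
  intro k ds _
  unfold Spec_solution
  exact solution_eq_alt k ds
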